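-- pv_equiv track=rewrite | github.com/vgm64/menu_item_extraction | ExtractMenuUsingPhrases.py | ExtractMenuItemUsingSuffixPhrases
-- ===== SOURCE A (Python) =====
-- def ExtractMenuItemUsingSuffixPhrases(sentencetokens,phrase):
--     len_of_item = 2
--     ntokens = len(sentencetokens)
--     theitems = []
--     for i,token in enumerate(sentencetokens):
--             if i-len(phrase) - len_of_item > 0 and phrase == sentencetokens[i-len(phrase):i]:
--                 #we found a match for the phrase as a suffix
--                 theitems.append(sentencetokens[i-len(phrase)-len_of_item:i-len(phrase)])
--     return theitems
-- ===== SOURCE B (Python) =====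
-- def ExtractMenuItemUsingSuffixPhrases(sentencetokens, phrase):
--     # Knuth-Morris-Pratt search of `phrase` over the token list: build the
--     # failure table once, then find every occurrence in one linear scan,
--     # emitting the two tokens preceding each occurrence.
--     # A only inspects matches ending strictly before the last token, so the
--     # text searched is sentencetokens[:n-1].
--     p = len(phrase)
--     n = len(sentencetokens)
--     text = sentencetokens[:n - 1]
--     if p == 0:
--         return [sentencetokens[s - 2:s] for s in range(3, len(text) + 1)]
--     fail = [0] * p
--     k = 0
--     for i in range(1, p):
--         while k > 0 and phrase[i] != phrase[k]:
--             k = fail[k - 1]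
--         if phrase[i] == phrase[k]:
--             k += 1
--         fail[i] = k
--     out = []
--     k = 0
--     for i, tok in enumerate(text):
--         while k > 0 and tok != phrase[k]:
--             k = fail[k - 1]
--         if tok == phrase[k]:
--             k += 1
--         if k == p:
--             s = i + 1 - p
--             if s >= 3:
--                 out.append(sentencetokens[s - 2:s])
--             k = fail[p - 1]
--     return out
-- ===== Notes on version B (the rewrite author's own statement) =====
-- stated objective: alternative
-- what changed: B replaces A's per-position slice comparison (compare phrase against sentencetokens[i-p:i] at every index) with Knuth-Morris-Pratt: it builds the failure table of the phrase once and finds all occurrences in a single linear scan, emitting the two preceding tokens at each match.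
import Mathlib
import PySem

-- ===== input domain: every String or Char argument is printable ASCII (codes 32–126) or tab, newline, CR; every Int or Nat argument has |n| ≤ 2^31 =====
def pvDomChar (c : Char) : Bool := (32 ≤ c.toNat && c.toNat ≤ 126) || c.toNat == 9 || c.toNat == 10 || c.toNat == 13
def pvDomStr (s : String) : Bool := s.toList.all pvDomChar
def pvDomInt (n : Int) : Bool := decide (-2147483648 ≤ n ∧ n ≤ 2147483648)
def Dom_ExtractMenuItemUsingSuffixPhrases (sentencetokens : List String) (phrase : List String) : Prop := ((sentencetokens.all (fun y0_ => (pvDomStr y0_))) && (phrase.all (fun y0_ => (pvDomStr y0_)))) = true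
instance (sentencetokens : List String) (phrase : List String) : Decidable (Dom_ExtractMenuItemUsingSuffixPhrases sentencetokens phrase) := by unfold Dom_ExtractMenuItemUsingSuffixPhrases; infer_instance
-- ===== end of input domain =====

-- B replaces A's per-position slice comparison by Knuth-Morris-Pratt search
-- (failure table + one linear scan) over the same token list.

-- ===== PORT A =====
def ExtractMenuItemUsingSuffixPhrases (sentencetokens : List String) (phrase : List String) : List (List String) :=
  -- len_of_item = 2; ntokens unused for the result; for i, token in enumerate(...)
  (PySem.List.enumerate sentencetokens 0).foldl
    (fun theitems ip =>
      if ip.1 - (phrase.length : Int) - 2 > 0 ∧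
         phrase = PySem.List.slice sentencetokens (some (ip.1 - phrase.length)) (some ip.1) then
        theitems ++ [PySem.List.slice sentencetokens
                      (some (ip.1 - phrase.length - 2)) (some (ip.1 - phrase.length))]
      else theitems)
    []

-- ===== PORT B =====
-- the inner 'while k > 0 and tok != phrase[k]: k = fail[k-1]' loop of Source B
-- (fuel makes it total; with a correct fail table k strictly decreases, so fuel = k suffices)
def pvWhile (P : List String) (fl : List Nat) (tok : String) : Nat → Nat → Nat
  | 0, k => k
  | fuel + 1, k => if k ≠ 0 ∧ tok ≠ P.getD k "" then pvWhile P fl tok fuel (fl.getD (k - 1) 0) else k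

-- fail = [0]*p; for i in range(1, p): …; fail[i] = k
def pvBuildFail (P : List String) : List Nat :=
  ((PySem.List.pyRange 1 (P.length : Int) 1).foldl
    (fun (st : List Nat × Nat) i =>
      let k1 := pvWhile P st.1 (P.getD i.toNat "") st.2 st.2
      let k2 := if P.getD i.toNat "" = P.getD k1 "" then k1 + 1 else k1
      (st.1.set i.toNat k2, k2))
    (List.replicate P.length 0, 0)).1

-- body of 'for i, tok in enumerate(text)' in Source B
def pvScanStep (tokens P : List String) (fl : List Nat)
    (st : List (List String) × Nat) (ia : Int × String) : List (List String) × Nat :=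
  let k1 := pvWhile P fl ia.2 st.2 st.2
  let k2 := if ia.2 = P.getD k1 "" then k1 + 1 else k1
  if k2 = P.length then
    let s : Int := ia.1 + 1 - (P.length : Int)
    ((if 3 ≤ s then st.1 ++ [PySem.List.slice tokens (some (s - 2)) (some s)] else st.1),
     fl.getD (P.length - 1) 0)
  else (st.1, k2)

def ExtractMenuItemUsingSuffixPhrases_alt (sentencetokens : List String) (phrase : List String) : List (List String) :=
  let text := PySem.List.slice sentencetokens none (some ((sentencetokens.length : Int) - 1))
  if phrase.length = 0 then
    (PySem.List.pyRange 3 ((text.length : Int) + 1) 1).map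
      (fun s => PySem.List.slice sentencetokens (some (s - 2)) (some s))
  else
    ((PySem.List.enumerate text 0).foldl
      (pvScanStep sentencetokens phrase (pvBuildFail phrase)) ([], 0)).1

-- ===== PRECONDITION & SPEC =====
def Spec_ExtractMenuItemUsingSuffixPhrases (sentencetokens : List String) (phrase : List String) (out : List (List String)) : Prop := out = ExtractMenuItemUsingSuffixPhrases_alt sentencetokens phrase
instance (sentencetokens : List String) (phrase : List String) (out : List (List String)) : Decidable (Spec_ExtractMenuItemUsingSuffixPhrases sentencetokens phrase out) := by unfold Spec_ExtractMenuItemUsingSuffixPhrases; infer_instance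

-- ===== CLAIM (what is proved, stated in full; the proofs are below) =====
def Claim_equal_ExtractMenuItemUsingSuffixPhrases : Prop := ∀ (sentencetokens : List String) (phrase : List String), Dom_ExtractMenuItemUsingSuffixPhrases sentencetokens phrase → Spec_ExtractMenuItemUsingSuffixPhrases sentencetokens phrase (ExtractMenuItemUsingSuffixPhrases sentencetokens phrase)

-- ===== LEMMAS AND PROOFS =====

-- ---- generic list facts ----

-- two suffixes of the same list: the shorter is a suffix of the longer
theorem pvSuffix_of_suffix_le {α : Type} {u w v : List α}
    (h1 : u <:+ v) (h2 : w <:+ v) (h : u.length ≤ w.length) : u <:+ w := by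
  have huv : u.length ≤ v.length := h1.length_le
  have hwv : w.length ≤ v.length := h2.length_le
  rw [List.suffix_iff_eq_drop] at h1 h2 ⊢
  calc u = List.drop (v.length - u.length) v := h1
    _ = List.drop ((v.length - w.length) + (w.length - u.length)) v := by
        congr 1; omega
    _ = List.drop (w.length - u.length) (List.drop (v.length - w.length) v) := by
        rw [List.drop_drop]
    _ = List.drop (w.length - u.length) w := by rw [← h2]

-- ---- the longest-matching-prefix function and the failure-table spec ----

-- pvM P t K = max { l ≤ K | P.take l is a suffix of t }
def pvM (P t : List String) (K : Nat) : Nat := Nat.findGreatest (fun l => P.take l <:+ t) K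

def pvFailSpec (P : List String) (i : Nat) : Nat := pvM P (P.take (i + 1)) i

theorem pvM_le (P t : List String) (K : Nat) : pvM P t K ≤ K := Nat.findGreatest_le K

theorem pvM_suffix (P t : List String) (K : Nat) : P.take (pvM P t K) <:+ t :=
  Nat.findGreatest_spec (P := fun l => P.take l <:+ t) (Nat.zero_le K) (by simp)

theorem pvM_max {P t : List String} {K l : Nat} (hl : l ≤ K) (hs : P.take l <:+ t) :
    l ≤ pvM P t K := Nat.le_findGreatest hl hs

theorem pvM_congr {P t t' : List String} {K : Nat}
    (h : ∀ l, 0 < l → l ≤ K → (P.take l <:+ t ↔ P.take l <:+ t')) :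
    pvM P t K = pvM P t' K := by
  induction K with
  | zero => rfl
  | succ K ih =>
    unfold pvM at *
    rw [Nat.findGreatest_succ, Nat.findGreatest_succ]
    by_cases hp : P.take (K + 1) <:+ t
    · rw [if_pos hp, if_pos ((h (K + 1) (by omega) le_rfl).mp hp)]
    · rw [if_neg hp, if_neg (fun hc => hp ((h (K + 1) (by omega) le_rfl).mpr hc)),
        ih (fun l h0 hl => h l h0 (by omega))]

-- decomposing 'P.take l is a suffix of t ++ [a]' for 0 < l ≤ |P|
theorem pvTake_suffix_snoc_iff {P t : List String} {a : String} {l : Nat}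
    (h0 : 0 < l) (hl : l ≤ P.length) :
    (P.take l <:+ t ++ [a]) ↔ (P.take (l - 1) <:+ t ∧ a = P.getD (l - 1) "") := by
  obtain ⟨m, rfl⟩ : ∃ m, l = m + 1 := ⟨l - 1, by omega⟩
  have hm : m < P.length := by omega
  have hget : P.getD m "" = P[m] := by
    rw [List.getD_eq_getElem?_getD, List.getElem?_eq_getElem hm]; rfl
  have htake : P.take (m + 1) = P.take m ++ [P[m]] := by
    rw [List.take_add_one, List.getElem?_eq_getElem hm]; rfl
  rw [htake]
  constructor
  · intro hs
    have := (List.reverse_prefix).mpr hs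
    rw [List.reverse_append, List.reverse_append] at this
    simp only [List.reverse_cons, List.reverse_nil, List.nil_append, List.singleton_append,
      List.cons_prefix_cons] at this
    refine ⟨(List.reverse_prefix).mp this.2, ?_⟩
    simp only [Nat.add_sub_cancel]
    rw [hget]
    exact this.1.symm
  · rintro ⟨hs, ha⟩
    simp only [Nat.add_sub_cancel] at hs ha
    have h1 : (P.take m).reverse <+: t.reverse := (List.reverse_prefix).mpr hs
    have : (P.take m ++ [P[m]]).reverse <+: (t ++ [a]).reverse := by
      rw [List.reverse_append, List.reverse_append]
      simp only [List.reverse_cons, List.reverse_nil, List.nil_append, List.singleton_append,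
        List.cons_prefix_cons]
      exact ⟨by rw [← hget, ← ha], h1⟩
    exact (List.reverse_prefix).mp this

-- ---- the while loop: descending the failure chain ----

theorem pvWhile_spec (P : List String) (fl : List Nat) (a : String) (t : List String) :
    ∀ (k fuel : Nat), k ≤ fuel → k < P.length → P.take k <:+ t →
    (∀ j, j < k → fl.getD j 0 = pvFailSpec P j) →
    pvWhile P fl a fuel k ≤ k ∧ P.take (pvWhile P fl a fuel k) <:+ t ∧
    (pvWhile P fl a fuel k = 0 ∨ a = P.getD (pvWhile P fl a fuel k) "") ∧
    (∀ l, l ≤ k → P.take l <:+ t → a = P.getD l "" → l ≤ pvWhile P fl a fuel k) := by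
  intro k
  induction k using Nat.strong_induction_on with
  | _ k ih =>
    intro fuel hfuel hk hsfx hfl
    by_cases hk0 : k = 0
    · subst hk0
      have hres : pvWhile P fl a fuel 0 = 0 := by
        cases fuel <;> simp [pvWhile]
      rw [hres]
      exact ⟨le_rfl, by simp, Or.inl rfl, fun l hl _ _ => hl⟩
    · obtain ⟨f, rfl⟩ : ∃ f, fuel = f + 1 := ⟨fuel - 1, by omega⟩
      by_cases ha : a = P.getD k ""
      · have hres : pvWhile P fl a (f + 1) k = k := by
          simp only [pvWhile]
          rw [if_neg (by tauto)]
        rw [hres]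
        exact ⟨le_rfl, hsfx, Or.inr ha, fun l hl _ _ => hl⟩
      · have hres : pvWhile P fl a (f + 1) k = pvWhile P fl a f (fl.getD (k - 1) 0) := by
          simp only [pvWhile]
          rw [if_pos ⟨hk0, ha⟩]
        have hflk : fl.getD (k - 1) 0 = pvM P (P.take k) (k - 1) := by
          rw [hfl (k - 1) (by omega), pvFailSpec]
          congr 2
          omega
        set k' := fl.getD (k - 1) 0 with hk'def
        have hk'lt : k' < k := by
          rw [hflk]
          have := pvM_le P (P.take k) (k - 1)
          omega
        have hsfx' : P.take k' <:+ t := by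
          rw [hflk]
          exact (pvM_suffix P (P.take k) (k - 1)).trans hsfx
        have hres' := ih k' hk'lt f (by omega) (by omega) hsfx'
          (fun j hj => hfl j (by omega))
        rw [hres]
        refine ⟨(hres'.1).trans (by omega), hres'.2.1, hres'.2.2.1, ?_⟩
        intro l hl hls hla
        have hlk : l ≠ k := fun h => ha (h ▸ hla)
        have hlle : l ≤ k' := by
          rw [hflk]
          refine pvM_max (by omega) ?_
          refine pvSuffix_of_suffix_le hls hsfx ?_
          rw [List.length_take, List.length_take]
          omega
        exact hres'.2.2.2 l hlle hls hla

-- one KMP step computes the new longest match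
theorem pvStep_eq (P : List String) (fl : List Nat) (a : String) (t : List String) (K : Nat)
    (hK : K < P.length)
    (hfl : ∀ j, j < K → fl.getD j 0 = pvFailSpec P j) :
    (if a = P.getD (pvWhile P fl a (pvM P t K) (pvM P t K)) "" then
       pvWhile P fl a (pvM P t K) (pvM P t K) + 1
     else pvWhile P fl a (pvM P t K) (pvM P t K)) = pvM P (t ++ [a]) (K + 1) := by
  have hkK : pvM P t K ≤ K := pvM_le P t K
  have hkp : pvM P t K < P.length := by omega
  obtain ⟨hr1, hr2, hr3, hr4⟩ := pvWhile_spec P fl a t (pvM P t K) (pvM P t K) le_rfl hkp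
    (pvM_suffix P t K) (fun j hj => hfl j (by omega))
  set r := pvWhile P fl a (pvM P t K) (pvM P t K) with hrdef
  by_cases ha : a = P.getD r ""
  · rw [if_pos ha]
    refine le_antisymm ?_ ?_
    · refine pvM_max (by omega) ?_
      refine (pvTake_suffix_snoc_iff (by omega) (by omega)).mpr ?_
      simp only [Nat.add_sub_cancel]
      exact ⟨hr2, ha⟩
    · set m := pvM P (t ++ [a]) (K + 1) with hmdef
      rcases Nat.eq_zero_or_pos m with hm0 | hm0
      · omega
      · have hms := pvM_suffix P (t ++ [a]) (K + 1)
        rw [← hmdef] at hms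
        have hmK : m ≤ K + 1 := pvM_le P (t ++ [a]) (K + 1)
        obtain ⟨hdec1, hdec2⟩ := (pvTake_suffix_snoc_iff hm0 (by omega)).mp hms
        have hmk : m - 1 ≤ pvM P t K := pvM_max (by omega) hdec1
        have := hr4 (m - 1) hmk hdec1 hdec2
        omega
  · rw [if_neg ha]
    have hr0 : r = 0 := by tauto
    rw [hr0]
    symm
    rw [pvM, Nat.findGreatest_eq_zero_iff]
    intro n hn0 hnK hns
    obtain ⟨hdec1, hdec2⟩ := (pvTake_suffix_snoc_iff hn0 (by omega)).mp hns
    have hnk : n - 1 ≤ pvM P t K := pvM_max (by omega) hdec1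
    have := hr4 (n - 1) hnk hdec1 hdec2
    have hn1 : n = 1 := by omega
    apply ha
    rw [hn1] at hdec2
    rw [hr0]
    exact hdec2

-- ---- correctness of the failure table ----

theorem pvFailSpec_zero (P : List String) : pvFailSpec P 0 = 0 := rfl

theorem pvBuild_inv (P : List String) (hp : 0 < P.length) :
    ∀ i, 1 ≤ i → i ≤ P.length →
    ((PySem.List.pyRange 1 (i : Int) 1).foldl
      (fun (st : List Nat × Nat) n =>
        let k1 := pvWhile P st.1 (P.getD n.toNat "") st.2 st.2
        let k2 := if P.getD n.toNat "" = P.getD k1 "" then k1 + 1 else k1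
        (st.1.set n.toNat k2, k2))
      (List.replicate P.length 0, 0)).1.length = P.length ∧
    (∀ j, j < i →
      ((PySem.List.pyRange 1 (i : Int) 1).foldl
        (fun (st : List Nat × Nat) n =>
          let k1 := pvWhile P st.1 (P.getD n.toNat "") st.2 st.2
          let k2 := if P.getD n.toNat "" = P.getD k1 "" then k1 + 1 else k1
          (st.1.set n.toNat k2, k2))
        (List.replicate P.length 0, 0)).1.getD j 0 = pvFailSpec P j) ∧
    ((PySem.List.pyRange 1 (i : Int) 1).foldl
      (fun (st : List Nat × Nat) n =>
        let k1 := pvWhile P st.1 (P.getD n.toNat "") st.2 st.2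
        let k2 := if P.getD n.toNat "" = P.getD k1 "" then k1 + 1 else k1
        (st.1.set n.toNat k2, k2))
      (List.replicate P.length 0, 0)).2 = pvFailSpec P (i - 1) := by
  intro i
  induction i with
  | zero => omega
  | succ i ih =>
    intro h1 h2
    rcases Nat.eq_zero_or_pos i with hi0 | hi0
    · subst hi0
      rw [show ((1 : Nat) : Int) = 1 by norm_num, PySem.List.pyRange_one_eq_nil le_rfl]
      refine ⟨by simp, ?_, by simp [pvFailSpec_zero]⟩
      intro j hj
      have hj0 : j = 0 := by omega
      subst hj0
      simp [List.getD_eq_getElem?_getD, hp, pvFailSpec_zero]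
    · obtain ⟨hlen, hcor, hk⟩ := ih hi0 (by omega)
      have hsplit : PySem.List.pyRange 1 ((i + 1 : Nat) : Int) 1
          = PySem.List.pyRange 1 (i : Int) 1 ++ [(i : Int)] := by
        rw [show ((i + 1 : Nat) : Int) = (i : Int) + 1 by push_cast; ring]
        exact PySem.List.pyRange_one_succ_right (by exact_mod_cast hi0)
      rw [hsplit, List.foldl_append]
      set st := (PySem.List.pyRange 1 (i : Int) 1).foldl
        (fun (st : List Nat × Nat) n =>
          let k1 := pvWhile P st.1 (P.getD n.toNat "") st.2 st.2
          let k2 := if P.getD n.toNat "" = P.getD k1 "" then k1 + 1 else k1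
          (st.1.set n.toNat k2, k2)) (List.replicate P.length 0, 0) with hstdef
      simp only [List.foldl_cons, List.foldl_nil, Int.toNat_natCast]
      have hip : i < P.length := by omega
      have hst2 : st.2 = pvM P (P.take i) (i - 1) := by
        rw [hk, pvFailSpec]
        congr 2
        omega
      have hstep := pvStep_eq P st.1 (P.getD i "") (P.take i) (i - 1) (by omega)
        (fun j hj => hcor j (by omega))
      rw [show (i - 1) + 1 = i by omega] at hstep
      have htake : P.take i ++ [P.getD i ""] = P.take (i + 1) := by
        rw [List.take_add_one, List.getElem?_eq_getElem hip]
        simp [List.getD_eq_getElem?_getD, List.getElem?_eq_getElem hip]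
      rw [htake] at hstep
      rw [← hst2] at hstep
      refine ⟨by simp [hlen], ?_, ?_⟩
      · intro j hj
        rcases Nat.lt_or_ge j i with hji | hji
        · rw [List.getD_eq_getElem?_getD, List.getElem?_set_ne (by omega),
            ← List.getD_eq_getElem?_getD]
          exact hcor j hji
        · have hj' : j = i := by omega
          subst hj'
          rw [List.getD_eq_getElem?_getD, List.getElem?_set_self (by omega)]
          simpa using hstep
      · simp only [Nat.add_sub_cancel]
        exact hstep

theorem pvBuildFail_correct (P : List String) :
    (pvBuildFail P).length = P.length ∧
    ∀ j, j < P.length → (pvBuildFail P).getD j 0 = pvFailSpec P j := by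
  rcases Nat.eq_zero_or_pos P.length with hp | hp
  · constructor
    · rw [pvBuildFail, show ((P.length : Int)) = 0 by exact_mod_cast hp,
        PySem.List.pyRange_one_eq_nil (by norm_num)]
      simp
    · intro j hj
      omega
  · have := pvBuild_inv P hp P.length hp le_rfl
    exact ⟨this.1, this.2.1⟩

-- ---- characterization of A ----

-- per-end-index emission (i is the exclusive END index of the phrase match)
def pvItem (st ph : List String) (i : Int) : Option (List String) :=
  if i - (ph.length : Int) - 2 > 0 ∧
     ph = PySem.List.slice st (some (i - ph.length)) (some i) then
    some (PySem.List.slice st (some (i - ph.length - 2)) (some (i - ph.length)))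
  else none

-- A's foldl over enumerate, fully general
theorem pvFoldA (st ph : List String) :
    ∀ (l : List String) (s : Int) (acc : List (List String)),
      (PySem.List.enumerate l s).foldl
        (fun theitems ip =>
          if ip.1 - (ph.length : Int) - 2 > 0 ∧
             ph = PySem.List.slice st (some (ip.1 - ph.length)) (some ip.1) then
            theitems ++ [PySem.List.slice st
                          (some (ip.1 - ph.length - 2)) (some (ip.1 - ph.length))]
          else theitems)
        acc
      = acc ++ (List.range l.length).filterMap (fun k : Nat => pvItem st ph (s + (k : Int))) := by
  intro l
  induction l with
  | nil => intro s acc; simp [PySem.List.enumerate_nil]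
  | cons x xs ih =>
    intro s acc
    have hshift : (List.range (xs.length + 1)).filterMap
          (fun k : Nat => pvItem st ph (s + (k : Int)))
        = (pvItem st ph s).toList
          ++ (List.range xs.length).filterMap (fun k : Nat => pvItem st ph ((s + 1) + (k : Int))) := by
      rw [List.range_succ_eq_map, List.filterMap_cons]
      have hf : (fun k : Nat => pvItem st ph (s + (k : Int))) ∘ Nat.succ
          = fun k : Nat => pvItem st ph ((s + 1) + (k : Int)) := by
        funext k
        simp only [Function.comp_apply]
        congr 1
        push_cast
        ring
      rw [List.filterMap_map, hf, Nat.cast_zero, add_zero]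
      cases pvItem st ph s <;> simp
    rw [PySem.List.enumerate_cons, List.foldl_cons, List.length_cons, hshift, ih]
    by_cases h : s - (ph.length : Int) - 2 > 0 ∧
        ph = PySem.List.slice st (some (s - ph.length)) (some s)
    · rw [if_pos h]
      have : pvItem st ph s
          = some (PySem.List.slice st (some (s - ph.length - 2)) (some (s - ph.length))) := by
        rw [pvItem, if_pos h]
      rw [this]
      simp
    · rw [if_neg h]
      have : pvItem st ph s = none := by rw [pvItem, if_neg h]
      rw [this]
      simp

theorem pvA_eq (st ph : List String) :
    ExtractMenuItemUsingSuffixPhrases st ph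
      = (List.range st.length).filterMap (fun k : Nat => pvItem st ph (k : Int)) := by
  rw [ExtractMenuItemUsingSuffixPhrases, pvFoldA st ph st 0]
  simp

-- ---- characterization of B's scan ----

-- what the scan emits while consuming l after having consumed t
def pvEmits (tokens P : List String) : List String → List String → List (List String)
  | _, [] => []
  | t, a :: l =>
    (if P <:+ t ++ [a] ∧ 3 ≤ (t.length : Int) + 1 - (P.length : Int) then
      [PySem.List.slice tokens (some ((t.length : Int) + 1 - (P.length : Int) - 2))
        (some ((t.length : Int) + 1 - (P.length : Int)))]
    else []) ++ pvEmits tokens P (t ++ [a]) l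

theorem pvM_nil (P : List String) (K : Nat) (hp : 0 < P.length) : pvM P [] K = 0 := by
  rw [pvM, Nat.findGreatest_eq_zero_iff]
  intro n hn0 _ hns
  rw [List.suffix_nil, List.take_eq_nil_iff] at hns
  rcases hns with h | h
  · omega
  · rw [h] at hp; simp at hp

theorem pvM_top_iff (P t : List String) (hp : 0 < P.length) :
    pvM P t P.length = P.length ↔ P <:+ t := by
  constructor
  · intro h
    have := pvM_suffix P t P.length
    rw [h, List.take_length] at this
    exact this
  · intro h
    refine le_antisymm (pvM_le P t P.length) (pvM_max le_rfl ?_)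
    rw [List.take_length]
    exact h

theorem pvM_drop_top (P t : List String) (hp : 0 < P.length) (h : pvM P t P.length ≠ P.length) :
    pvM P t P.length = pvM P t (P.length - 1) := by
  obtain ⟨q, hq⟩ : ∃ q, P.length = q + 1 := ⟨P.length - 1, by omega⟩
  have h1 : pvM P t P.length = if P.take (q + 1) <:+ t then q + 1 else pvM P t q := by
    rw [pvM, hq, Nat.findGreatest_succ]
    rfl
  by_cases hc : P.take (q + 1) <:+ t
  · rw [h1, if_pos hc] at h
    rw [hq] at h
    exact absurd rfl h
  · rw [h1, if_neg hc, hq]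
    norm_num

theorem pvM_reset (P t : List String) (hp : 0 < P.length) (h : P <:+ t) :
    pvM P P (P.length - 1) = pvM P t (P.length - 1) := by
  refine pvM_congr ?_
  intro l hl0 hlK
  constructor
  · intro hs
    exact hs.trans h
  · intro hs
    refine pvSuffix_of_suffix_le hs h ?_
    rw [List.length_take]
    omega

theorem pvScan_inv (tokens P : List String) (fl : List Nat) (hp : 0 < P.length)
    (hfl : ∀ j, j < P.length → fl.getD j 0 = pvFailSpec P j) :
    ∀ (l t : List String) (out : List (List String)),
      ((PySem.List.enumerate l (t.length : Int)).foldl (pvScanStep tokens P fl)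
        (out, pvM P t (P.length - 1))).1
      = out ++ pvEmits tokens P t l := by
  intro l
  induction l with
  | nil => intro t out; simp [PySem.List.enumerate_nil, pvEmits]
  | cons a l ih =>
    intro t out
    rw [PySem.List.enumerate_cons, List.foldl_cons]
    have hstep := pvStep_eq P fl a t (P.length - 1) (by omega)
      (fun j hj => hfl j (by omega))
    rw [show P.length - 1 + 1 = P.length by omega] at hstep
    rw [pvScanStep]
    simp only [hstep]
    by_cases hsa : P <:+ t ++ [a]
    · have hk2 : pvM P (t ++ [a]) P.length = P.length := (pvM_top_iff P (t ++ [a]) hp).mpr hsa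
      rw [if_pos hk2]
      have hreset : fl.getD (P.length - 1) 0 = pvM P (t ++ [a]) (P.length - 1) := by
        rw [hfl (P.length - 1) (by omega), pvFailSpec, show P.length - 1 + 1 = P.length by omega,
          List.take_length]
        exact pvM_reset P (t ++ [a]) hp hsa
      rw [hreset]
      have hlen : ((t ++ [a]).length : Int) = (t.length : Int) + 1 := by
        simp
      have := ih (t ++ [a])
      rw [hlen] at this
      by_cases hs3 : 3 ≤ (t.length : Int) + 1 - (P.length : Int)
      · rw [if_pos hs3, this, pvEmits, if_pos ⟨hsa, hs3⟩]
        simp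
      · rw [if_neg hs3, this, pvEmits, if_neg (fun hc => hs3 hc.2)]
        simp
    · have hk2 : pvM P (t ++ [a]) P.length ≠ P.length := by
        intro hc
        exact hsa ((pvM_top_iff P (t ++ [a]) hp).mp hc)
      rw [if_neg hk2]
      rw [pvM_drop_top P (t ++ [a]) hp hk2]
      have hlen : ((t ++ [a]).length : Int) = (t.length : Int) + 1 := by simp
      have := ih (t ++ [a])
      rw [hlen] at this
      rw [this, pvEmits, if_neg (fun hc => hsa hc.1)]
      simp

-- emissions as a filterMap over match end indices of the full text
def pvF (tokens P text : List String) (e : Nat) : Option (List String) :=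
  if P <:+ text.take (e + 1) ∧ 3 ≤ ((e : Int)) + 1 - (P.length : Int) then
    some (PySem.List.slice tokens (some ((e : Int) + 1 - (P.length : Int) - 2))
      (some ((e : Int) + 1 - (P.length : Int))))
  else none

theorem pvEmits_eq (tokens P : List String) :
    ∀ (l t : List String),
      pvEmits tokens P t l
        = (List.range l.length).filterMap (fun j => pvF tokens P (t ++ l) (t.length + j)) := by
  intro l
  induction l with
  | nil => intro t; simp [pvEmits]
  | cons a l ih =>
    intro t
    rw [pvEmits, List.length_cons, List.range_succ_eq_map, List.filterMap_cons]
    have htk : (t ++ a :: l).take (t.length + 0 + 1) = t ++ [a] := by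
      rw [Nat.add_zero, show t.length + 1 = t.length + 1 from rfl]
      rw [List.take_append]
      simp
    have hhead : pvF tokens P (t ++ a :: l) (t.length + 0)
        = if P <:+ t ++ [a] ∧ 3 ≤ (t.length : Int) + 1 - (P.length : Int) then
            some (PySem.List.slice tokens (some ((t.length : Int) + 1 - (P.length : Int) - 2))
              (some ((t.length : Int) + 1 - (P.length : Int)))) else none := by
      rw [pvF, htk]
      norm_num
    have htail : (List.map Nat.succ (List.range l.length)).filterMap
          (fun j => pvF tokens P (t ++ a :: l) (t.length + j))
        = (List.range l.length).filterMap
            (fun j => pvF tokens P ((t ++ [a]) ++ l) ((t ++ [a]).length + j)) := by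
      rw [List.filterMap_map]
      apply List.filterMap_congr
      intro j _
      simp only [Function.comp_apply]
      have h1 : (t ++ [a]) ++ l = t ++ a :: l := by simp
      have h2 : (t ++ [a]).length + j = t.length + (j + 1) := by simp; omega
      rw [h1, h2]
    rw [hhead, ih (t ++ [a]), ← htail]
    by_cases hc : P <:+ t ++ [a] ∧ 3 ≤ (t.length : Int) + 1 - (P.length : Int)
    · rw [if_pos hc, if_pos hc]
      simp
    · rw [if_neg hc, if_neg hc]
      simp

-- ---- relating the two characterizations ----

theorem pvItem_eq_pvF (tokens P : List String) (hp : 0 < P.length) (j : Nat)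
    (hj : j + 1 ≤ tokens.length - 1) :
    pvItem tokens P ((j : Int) + 1) = pvF tokens P tokens.dropLast j := by
  rw [pvItem, pvF]
  by_cases h3 : 3 ≤ ((j : Int)) + 1 - (P.length : Int)
  · have hpj : P.length + 3 ≤ j + 1 := by omega
    have hslice : PySem.List.slice tokens (some ((j : Int) + 1 - (P.length : Int)))
        (some ((j : Int) + 1)) = (tokens.drop (j + 1 - P.length)).take P.length := by
      rw [show ((j : Int) + 1 - (P.length : Int)) = ((j + 1 - P.length : Nat) : Int) by omega,
        show ((j : Int) + 1) = ((j + 1 : Nat) : Int) by omega,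
        PySem.List.slice_natCast]
      congr 1
      omega
    have htext : tokens.dropLast.take (j + 1) = tokens.take (j + 1) := by
      rw [List.dropLast_eq_take, List.take_take]
      congr 1
      omega
    have hsuffix : (P <:+ tokens.dropLast.take (j + 1))
        ↔ P = (tokens.drop (j + 1 - P.length)).take P.length := by
      rw [htext, List.suffix_iff_eq_drop, List.length_take]
      have hmin : min (j + 1) tokens.length = j + 1 := by omega
      rw [hmin, List.drop_take, show j + 1 - (j + 1 - P.length) = P.length by omega]
    refine if_congr ?_ rfl rfl
    constructor
    · rintro ⟨h1, h2⟩
      rw [hslice] at h2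
      exact ⟨hsuffix.mpr h2, h3⟩
    · rintro ⟨h1, _⟩
      refine ⟨by omega, ?_⟩
      rw [hslice]
      exact hsuffix.mp h1
  · rw [if_neg (fun hc => h3 (by have := hc.1; omega)), if_neg (fun hc => h3 hc.2)]

theorem pvRangeFilter (f : Int → List String) :
    ∀ n : Nat, (List.range n).filterMap (fun e : Nat => if 3 ≤ e then some (f (e : Int)) else none)
      = (PySem.List.pyRange 3 (n : Int) 1).map f := by
  intro n
  induction n with
  | zero => simp [PySem.List.pyRange_one_eq_nil]
  | succ n ih =>
    rw [List.range_succ, List.filterMap_append, ih]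
    by_cases h3 : 3 ≤ n
    · have : PySem.List.pyRange 3 ((n + 1 : Nat) : Int) 1
          = PySem.List.pyRange 3 (n : Int) 1 ++ [(n : Int)] := by
        rw [show ((n + 1 : Nat) : Int) = (n : Int) + 1 by push_cast; ring]
        exact PySem.List.pyRange_one_succ_right (by exact_mod_cast h3)
      rw [this, List.map_append]
      simp [h3]
    · have h1 : PySem.List.pyRange 3 ((n + 1 : Nat) : Int) 1 = [] :=
        PySem.List.pyRange_one_eq_nil (by exact_mod_cast (by omega : n + 1 ≤ 3))
      have h2 : PySem.List.pyRange 3 ((n : Nat) : Int) 1 = [] :=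
        PySem.List.pyRange_one_eq_nil (by exact_mod_cast (by omega : n ≤ 3))
      rw [h1, List.map_nil]
      have hnil : (List.range n).filterMap
          (fun e : Nat => if 3 ≤ e then some (f (e : Int)) else none) = [] := by
        rw [ih, h2, List.map_nil]
      simp [h3, h2]

theorem pvText_eq (tokens : List String) :
    PySem.List.slice tokens none (some ((tokens.length : Int) - 1)) = tokens.dropLast := by
  rcases Nat.eq_zero_or_pos tokens.length with h0 | h0
  · rw [show ((tokens.length : Int) - 1) = (-1 : Int) by omega]
    exact PySem.List.slice_to_neg_one tokens
  · rw [show ((tokens.length : Int) - 1) = ((tokens.length - 1 : Nat) : Int) by omega,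
      PySem.List.slice_to_natCast, ← List.dropLast_eq_take]

-- ===== VERDICT (by name: the statement is the Claim_ definition above) =====
theorem ExtractMenuItemUsingSuffixPhrases_spec : Claim_equal_ExtractMenuItemUsingSuffixPhrases := by
  intro tokens P _
  show ExtractMenuItemUsingSuffixPhrases tokens P = ExtractMenuItemUsingSuffixPhrases_alt tokens P
  rw [pvA_eq, ExtractMenuItemUsingSuffixPhrases_alt]
  simp only [pvText_eq]
  by_cases hp : P.length = 0
  · rw [if_pos hp]
    have hPnil : P = [] := List.eq_nil_of_length_eq_zero hp
    have hpoint : ∀ k : Nat, pvItem tokens P ((k : Int))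
        = if 3 ≤ k then
            some (PySem.List.slice tokens (some ((k : Int) - 2)) (some ((k : Int)))) else none := by
      intro k
      rw [pvItem, hPnil]
      by_cases h3 : 3 ≤ k
      · rw [if_pos, if_pos h3]
        · simp
        · constructor
          · simp only [List.length_nil, Nat.cast_zero]
            omega
          · rw [show ((k : Int) - ((List.length ([] : List String)) : Int)) = ((k : Nat) : Int) by
              simp, PySem.List.slice_natCast]
            simp
      · rw [if_neg, if_neg h3]
        intro hc
        have := hc.1
        simp only [List.length_nil, Nat.cast_zero] at this
        omega
    have hLHS : (List.range tokens.length).filterMap (fun k : Nat => pvItem tokens P ((k : Int)))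
        = (PySem.List.pyRange 3 ((tokens.length : Int)) 1).map
            (fun s => PySem.List.slice tokens (some (s - 2)) (some s)) := by
      rw [← pvRangeFilter (fun s : Int => PySem.List.slice tokens (some (s - 2)) (some s))
        tokens.length]
      apply List.filterMap_congr
      intro k _
      rw [hpoint k]
    rw [hLHS]
    have hdl : tokens.dropLast.length = tokens.length - 1 := List.length_dropLast
    rw [hdl]
    rcases Nat.eq_zero_or_pos tokens.length with h0 | h0
    · rw [PySem.List.pyRange_one_eq_nil (by omega),
        PySem.List.pyRange_one_eq_nil (by omega)]
    · rw [show ((tokens.length - 1 : Nat) : Int) + 1 = (tokens.length : Int) by omega]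
  · rw [if_neg hp]
    obtain ⟨hbl, hbc⟩ := pvBuildFail_correct P
    have hinv := pvScan_inv tokens P (pvBuildFail P) (by omega) hbc tokens.dropLast [] []
    rw [pvM_nil P (P.length - 1) (by omega)] at hinv
    norm_num at hinv
    rw [hinv, pvEmits_eq]
    simp only [List.nil_append, List.length_nil, Nat.zero_add]
    rcases Nat.eq_zero_or_pos tokens.length with h0 | h0
    · have : tokens = [] := List.eq_nil_of_length_eq_zero h0
      subst this
      simp
    · obtain ⟨m, hm⟩ : ∃ m, tokens.length = m + 1 := ⟨tokens.length - 1, by omega⟩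
      have hdl : tokens.dropLast.length = m := by rw [List.length_dropLast, hm]; omega
      rw [hm, hdl, List.range_succ_eq_map, List.filterMap_cons]
      have h00 : pvItem tokens P ((0 : Nat) : Int) = none := by
        rw [pvItem, if_neg]
        intro hc
        have := hc.1
        simp only [Nat.cast_zero] at this
        omega
      rw [h00, List.filterMap_map]
      apply List.filterMap_congr
      intro j hj
      have hjm : j < m := List.mem_range.mp hj
      simp only [Function.comp_apply]
      rw [show ((Nat.succ j : Nat) : Int) = ((j : Int) + 1) by push_cast; ring]
      exact pvItem_eq_pvF tokens P (by omega) j (by omega)
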